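-- pv_equiv track=rewrite | github.com/Billybar/py-exam | 24b_m-81/q1.py | biggest_sum_row
-- ===== SOURCE A (Python) =====
-- def biggest_sum(lst):
--     zero_indices = []
--     # Find all indices where 0 appears
--     for i in range(len(lst)):
--         if lst[i] == 0:
--             zero_indices.append(i)
--
--     # Initialize with a value lower than any possible sum (sums are non-negative)
--     max_segment_sum = -1
--
--     # Iterate through consecutive pairs of zero indices
--     for i in range(len(zero_indices) - 1):
--         start_zero_idx = zero_indices[i]
--         end_zero_idx = zero_indices[i+1]
--
--         current_segment_sum = 0
--         # Sum the numbers strictly between the two zeros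
--         for j in range(start_zero_idx + 1, end_zero_idx):
--             current_segment_sum += lst[j]
--
--         # Update the maximum sum if the current segment's sum is greater
--         if current_segment_sum > max_segment_sum:
--             max_segment_sum = current_segment_sum
--
--     return max_segment_sum
--
-- def biggest_sum_row(mat):
--     max_overall_sum = -1  # Initialize with a value lower than any possible sum
--     row_with_max_sum_index = -1
--
--     # Iterate through each row with its index
--     for i in range(len(mat)):
--         current_row = mat[i]
--         # Use the biggest_sum function to get the max sum for the current row
--         current_row_max_sum = biggest_sum(current_row)
--
--         # Update overall max sum and corresponding row index
--         if current_row_max_sum > max_overall_sum: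
--             max_overall_sum = current_row_max_sum
--             row_with_max_sum_index = i
--
--     return row_with_max_sum_index
-- ===== SOURCE B (Python) =====
-- def _row_best(row):
--     # single left-to-right pass: best sum of a segment strictly between two zeros
--     seen_zero = False
--     cur = 0
--     best = -1
--     for x in row:
--         if x == 0:
--             if seen_zero and cur > best:
--                 best = cur
--             seen_zero = True
--             cur = 0
--         elif seen_zero:
--             cur += x
--     return best
--
--
-- def biggest_sum_row(mat):
--     best_sum = -1
--     best_row = -1
--     for i, row in enumerate(mat):
--         s = _row_best(row)
--         if s > best_sum:
--             best_sum = s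
--             best_row = i
--     return best_row
-- ===== Notes on version B (the rewrite author's own statement) =====
-- stated objective: simpler
-- what changed: Each row's best between-zeros segment sum is computed in a single left-to-right pass with a seen-zero flag and running accumulator, instead of collecting all zero indices and then re-summing each span between consecutive zero positions by index.
import Mathlib
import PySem

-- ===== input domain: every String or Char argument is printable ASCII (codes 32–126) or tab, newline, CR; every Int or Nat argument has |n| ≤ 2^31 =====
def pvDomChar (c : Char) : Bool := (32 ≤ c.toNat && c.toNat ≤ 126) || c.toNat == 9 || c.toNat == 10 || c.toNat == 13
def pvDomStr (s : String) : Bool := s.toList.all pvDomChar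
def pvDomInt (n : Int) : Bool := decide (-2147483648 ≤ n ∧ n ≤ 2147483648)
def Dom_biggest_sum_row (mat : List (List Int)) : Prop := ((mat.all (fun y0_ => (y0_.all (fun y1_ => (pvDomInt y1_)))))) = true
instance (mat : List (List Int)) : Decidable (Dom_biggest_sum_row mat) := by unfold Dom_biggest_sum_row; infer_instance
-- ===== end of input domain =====

-- B replaces A's two-phase per-row helper (collect zero indices, then re-sum between
-- consecutive zero positions) by a single left-to-right pass with a seen-zero flag;
-- same return value, proved equivalent on all inputs.


-- ===== PORT A =====
-- helper biggest_sum of A, transliterated: collect zero indices, then loop over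
-- consecutive pairs re-summing the elements strictly between them
def biggest_sum (lst : List Int) : Int :=
  let zero_indices : List Int :=
    (PySem.List.pyRange 0 (lst.length : Int)).foldl
      (fun acc i => if PySem.List.pyGetD lst i 0 = 0 then acc ++ [i] else acc) []
  (PySem.List.pyRange 0 ((zero_indices.length : Int) - 1)).foldl
    (fun max_segment_sum i =>
      let start_zero_idx := PySem.List.pyGetD zero_indices i 0
      let end_zero_idx := PySem.List.pyGetD zero_indices (i + 1) 0
      let current_segment_sum :=
        (PySem.List.pyRange (start_zero_idx + 1) end_zero_idx).foldl
          (fun acc j => acc + PySem.List.pyGetD lst j 0) 0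
      if current_segment_sum > max_segment_sum then current_segment_sum
      else max_segment_sum)
    (-1)

def biggest_sum_row (mat : List (List Int)) : Int :=
  ((PySem.List.pyRange 0 (mat.length : Int)).foldl
    (fun (acc : Int × Int) i =>
      let current_row_max_sum := biggest_sum (PySem.List.pyGetD mat i [])
      if current_row_max_sum > acc.1 then (current_row_max_sum, i) else acc)
    (-1, -1)).2

-- ===== PORT B =====
-- B's per-element step: state (seen_zero, cur, best)
def stepB (st : Bool × Int × Int) (x : Int) : Bool × Int × Int :=
  if x = 0 then
    (true, 0, if st.1 ∧ st.2.1 > st.2.2 then st.2.1 else st.2.2)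
  else if st.1 then (true, st.2.1 + x, st.2.2)
  else st

def row_best (row : List Int) : Int :=
  (row.foldl stepB (false, 0, -1)).2.2

def biggest_sum_row_alt (mat : List (List Int)) : Int :=
  ((PySem.List.enumerate mat 0).foldl
    (fun (acc : Int × Int) p =>
      let s := row_best p.2
      if s > acc.1 then (s, p.1) else acc)
    (-1, -1)).2

-- ===== PRECONDITION & SPEC =====
def Spec_biggest_sum_row (mat : List (List Int)) (out : Int) : Prop := out = biggest_sum_row_alt mat
instance (mat : List (List Int)) (out : Int) : Decidable (Spec_biggest_sum_row mat out) := by unfold Spec_biggest_sum_row; infer_instance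

-- ===== CLAIM (what is proved, stated in full; the proofs are below) =====
def Claim_equal_biggest_sum_row : Prop := ∀ (mat : List (List Int)), Dom_biggest_sum_row mat → Spec_biggest_sum_row mat (biggest_sum_row mat)

-- ===== LEMMAS AND PROOFS =====

-- A's "update if strictly greater" step
def maxU (acc s : Int) : Int := if s > acc then s else acc

def segsFrom (cur : Int) : List Int → List Int
  | [] => []
  | x :: xs => if x = 0 then cur :: segsFrom 0 xs else segsFrom (cur + x) xs

def segsAll : List Int → List Int
  | [] => []
  | x :: xs => if x = 0 then segsFrom 0 xs else segsAll xs

def Zs (lst : List Int) : List Nat :=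
  (List.range lst.length).filter (fun k => decide (lst.getD k 0 = 0))

def S (lst : List Int) (a b : Nat) : Int := ((lst.drop (a + 1)).take (b - (a + 1))).sum

def g (lst : List Int) : List Int :=
  ((Zs lst).zip (Zs lst).tail).map (fun p => S lst p.1 p.2)

lemma Zs_cons (x : Int) (xs : List Int) :
    Zs (x :: xs) = (if x = 0 then [0] else []) ++ (Zs xs).map Nat.succ := by
  unfold Zs
  simp [List.range_succ_eq_map, List.filter_cons, List.filter_map, Function.comp_def]
  split_ifs <;> simp <;> rfl

lemma S_succ (x : Int) (xs : List Int) (a b : Nat) :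
    S (x :: xs) (a + 1) (b + 1) = S xs a b := by
  simp [S, List.drop_succ_cons]

lemma zip_tail_map {α β : Type} (f : α → β) (l : List α) :
    (l.map f).zip ((l.map f).tail) = (l.zip l.tail).map (fun p => (f p.1, f p.2)) := by
  rw [← List.map_tail, List.zip_map]
  simp [Prod.map_def]

lemma map_S_shift (x : Int) (xs : List Int) (l : List Nat) :
    ((l.map Nat.succ).zip ((l.map Nat.succ).tail)).map (fun p => S (x :: xs) p.1 p.2) =
      (l.zip l.tail).map (fun p => S xs p.1 p.2) := by
  rw [zip_tail_map, List.map_map]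
  apply List.map_congr_left
  intro p _
  simp [Function.comp, S_succ]

lemma g_cons_zero (xs : List Int) :
    g ((0 : Int) :: xs) =
      (match Zs xs with
       | [] => []
       | b :: _ => (xs.take b).sum :: g xs) := by
  unfold g
  rw [Zs_cons]
  cases h : Zs xs with
  | nil => simp [h]
  | cons b rest =>
    rw [if_pos rfl]
    simp only [List.map_cons, List.singleton_append, List.tail_cons, List.zip_cons_cons,
      List.map_cons]
    refine congrArg₂ _ ?_ ?_
    · simp [S]
    · exact map_S_shift 0 xs (b :: rest)

lemma g_cons_ne (x : Int) (hx : x ≠ 0) (xs : List Int) : g (x :: xs) = g xs := by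
  unfold g
  rw [Zs_cons, if_neg hx, List.nil_append]
  exact map_S_shift x xs (Zs xs)

lemma segsFrom_eq (xs : List Int) : ∀ (cur : Int),
    segsFrom cur xs =
      (match Zs xs with
       | [] => []
       | b :: _ => (cur + (xs.take b).sum) :: g xs) := by
  induction xs with
  | nil => intro cur; simp [segsFrom, Zs]
  | cons x xs ih =>
    intro cur
    by_cases hx : x = 0
    · subst hx
      rw [segsFrom, if_pos rfl, Zs_cons, if_pos rfl, g_cons_zero, ih 0]
      cases h : Zs xs with
      | nil => simp [h]
      | cons b rest => simp [h]
    · rw [segsFrom, if_neg hx, Zs_cons, if_neg hx, List.nil_append, g_cons_ne x hx, ih (cur + x)]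
      cases h : Zs xs with
      | nil => simp
      | cons b rest =>
        simp only [List.map_cons]
        refine congrArg₂ _ ?_ rfl
        simp [List.sum_cons]
        ring

lemma g_eq_segsAll (xs : List Int) : g xs = segsAll xs := by
  induction xs with
  | nil => simp [g, Zs, segsAll]
  | cons x xs ih =>
    by_cases hx : x = 0
    · subst hx
      rw [segsAll, if_pos rfl, g_cons_zero, segsFrom_eq xs 0]
      cases h : Zs xs with
      | nil => simp
      | cons b rest => simp
    · rw [segsAll, if_neg hx, g_cons_ne x hx, ih]

lemma foldB_seen (l : List Int) : ∀ (cur best : Int),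
    (l.foldl stepB (true, cur, best)).2.2 = (segsFrom cur l).foldl maxU best := by
  induction l with
  | nil => intro cur best; simp [segsFrom]
  | cons x xs ih =>
    intro cur best
    by_cases hx : x = 0
    · subst hx
      rw [List.foldl_cons, segsFrom, if_pos rfl, List.foldl_cons,
        show stepB (true, cur, best) 0 = (true, 0, maxU best cur) by simp [stepB, maxU], ih]
    · rw [List.foldl_cons, segsFrom, if_neg hx,
        show stepB (true, cur, best) x = (true, cur + x, best) by simp [stepB, hx]]
      exact ih (cur + x) best

lemma foldB_unseen (l : List Int) : ∀ (c best : Int),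
    (l.foldl stepB (false, c, best)).2.2 = (segsAll l).foldl maxU best := by
  induction l with
  | nil => intro c best; simp [segsAll]
  | cons x xs ih =>
    intro c best
    by_cases hx : x = 0
    · subst hx
      rw [List.foldl_cons, segsAll, if_pos rfl,
        show stepB (false, c, best) 0 = (true, 0, best) by simp [stepB]]
      exact foldB_seen xs 0 best
    · rw [List.foldl_cons, segsAll, if_neg hx,
        show stepB (false, c, best) x = (false, c, best) by simp [stepB, hx]]
      exact ih c best

lemma row_best_eq (row : List Int) : row_best row = (segsAll row).foldl maxU (-1) := by
  exact foldB_unseen row 0 (-1)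

lemma zisA_eq (lst : List Int) :
    (PySem.List.pyRange 0 (lst.length : Int)).foldl
      (fun acc i => if PySem.List.pyGetD lst i 0 = 0 then acc ++ [i] else acc) [] =
    (Zs lst).map (fun k => (Int.ofNat k)) := by
  rw [PySem.List.pyRange_zero_nat, List.foldl_map,
    show (fun (acc : List Int) (k : Nat) =>
        if PySem.List.pyGetD lst (k : Int) 0 = 0 then acc ++ [(k : Int)] else acc)
      = (fun acc k => if (fun k => decide (lst.getD k 0 = 0)) k = true
          then acc ++ [(fun (k : Nat) => (k : Int)) k] else acc) by
        funext acc k; simp [PySem.List.pyGetD_natCast],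
    PySem.List.foldl_append_if, List.nil_append]
  rfl

lemma foldl_range_pairs {α β : Type} (f : β → α × α → β) (d : α) :
    ∀ (zl : List α) (init : β),
      (List.range (zl.length - 1)).foldl
        (fun acc i => f acc (zl.getD i d, zl.getD (i + 1) d)) init =
      (zl.zip zl.tail).foldl f init := by
  intro zl
  induction zl with
  | nil => intro init; simp
  | cons a t ih =>
    intro init
    cases t with
    | nil => simp
    | cons b rest =>
      rw [show (a :: b :: rest).length - 1 = ((b :: rest).length - 1) + 1 by simp,
        List.range_succ_eq_map, List.foldl_cons, List.foldl_map]
      rw [show ((a :: b :: rest).zip (a :: b :: rest).tail)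
          = (a, b) :: ((b :: rest).zip (b :: rest).tail) by simp [List.zip_cons_cons],
        List.foldl_cons]
      rw [show (f init ((a :: b :: rest).getD 0 d, (a :: b :: rest).getD (0 + 1) d))
          = f init (a, b) by simp]
      rw [PySem.List.foldl_congr_mem _ _
        (fun acc i => f acc ((b :: rest).getD i d, (b :: rest).getD (i + 1) d)) _
        (by intro acc i _; simp)]
      exact ih (f init (a, b))

lemma map_range_getD (lst : List Int) (s c : Nat) (h : s + c ≤ lst.length) :
    (List.range c).map (fun k => lst.getD (s + k) 0) = (lst.drop s).take c := by
  apply List.ext_getElem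
  · simp; omega
  · intro i hi1 hi2
    simp only [List.getElem_map, List.getElem_range, List.getElem_take, List.getElem_drop]
    rw [List.getD_eq_getElem lst 0 (by simp at hi1 ⊢; omega)]

lemma inner_sum_eq (lst : List Int) (a b : Nat) (hb : b ≤ lst.length) :
    (PySem.List.pyRange ((a : Int) + 1) (b : Int)).foldl
      (fun acc j => acc + PySem.List.pyGetD lst j 0) 0 = S lst a b := by
  rw [PySem.List.foldl_add, PySem.List.pyRange_one, List.map_map]
  by_cases hab : b ≤ a + 1
  · rw [show ((b : Int) - ((a : Int) + 1)).toNat = 0 by omega]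
    simp [S, show b - (a + 1) = 0 by omega]
  · rw [show ((b : Int) - ((a : Int) + 1)).toNat = b - (a + 1) by omega]
    rw [show ((fun j => PySem.List.pyGetD lst j 0) ∘ fun k : Nat => (a : Int) + 1 + (k : Int))
        = (fun k : Nat => lst.getD (a + 1 + k) 0) by
          funext k
          show PySem.List.pyGetD lst ((a : Int) + 1 + (k : Int)) 0 = _
          rw [show ((a : Int) + 1 + (k : Int)) = ((a + 1 + k : Nat) : Int) by push_cast; ring,
            PySem.List.pyGetD_natCast]]
    rw [map_range_getD lst (a + 1) (b - (a + 1)) (by omega)]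
    simp [S]

lemma biggest_sum_eq (lst : List Int) :
    biggest_sum lst = (segsAll lst).foldl maxU (-1) := by
  rw [← g_eq_segsAll]
  unfold biggest_sum
  simp only [zisA_eq, List.length_map]
  rw [PySem.List.pyRange_zero, List.foldl_map,
    show ((((Zs lst).length : Int)) - 1).toNat = (Zs lst).length - 1 by omega]
  have hstep : ∀ (acc : Int), ∀ k ∈ List.range ((Zs lst).length - 1),
      (fun (max_segment_sum : Int) (i : Int) =>
        let start_zero_idx := PySem.List.pyGetD ((Zs lst).map (fun k => Int.ofNat k)) i 0
        let end_zero_idx := PySem.List.pyGetD ((Zs lst).map (fun k => Int.ofNat k)) (i + 1) 0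
        let current_segment_sum :=
          (PySem.List.pyRange (start_zero_idx + 1) end_zero_idx).foldl
            (fun acc j => acc + PySem.List.pyGetD lst j 0) 0
        if current_segment_sum > max_segment_sum then current_segment_sum
        else max_segment_sum) acc ((k : Nat) : Int)
      = maxU acc (S lst ((Zs lst).getD k 0) ((Zs lst).getD (k + 1) 0)) := by
    intro acc k hk
    simp only [List.mem_range] at hk
    show (if _ > acc then _ else acc) = _
    rw [show ((k : Nat) : Int) + 1 = ((k + 1 : Nat) : Int) by push_cast; ring,
      PySem.List.pyGetD_natCast, PySem.List.pyGetD_natCast]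
    have hgd : ∀ (n : Nat), (List.map (fun k => Int.ofNat k) (Zs lst)).getD n 0
        = Int.ofNat ((Zs lst).getD n 0) := fun n => List.getD_map (Zs lst) 0 (fun k => Int.ofNat k)
    rw [hgd, hgd]
    have hz : ∀ z ∈ Zs lst, z < lst.length := by
      intro z hzz
      simp only [Zs, List.mem_filter, List.mem_range] at hzz
      exact hzz.1
    have hb : (Zs lst).getD (k + 1) 0 ≤ lst.length := by
      have hk1 : k + 1 < (Zs lst).length := by omega
      rw [List.getD_eq_getElem _ 0 hk1]
      exact le_of_lt (hz _ (List.getElem_mem hk1))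
    simp only [Int.ofNat_eq_natCast]
    rw [inner_sum_eq lst _ _ hb]
    rfl
  rw [PySem.List.foldl_congr_mem _ _ _ _ hstep]
  have hpairs := foldl_range_pairs (fun (acc : Int) (p : Nat × Nat) => maxU acc (S lst p.1 p.2)) 0 (Zs lst) (-1)
  rw [show (fun acc k => maxU acc (S lst ((Zs lst).getD k 0) ((Zs lst).getD (k + 1) 0)))
      = (fun (acc : Int) (i : Nat) => (fun (acc : Int) (p : Nat × Nat) => maxU acc (S lst p.1 p.2)) acc
          ((Zs lst).getD i 0, (Zs lst).getD (i + 1) 0)) from rfl, hpairs]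
  rw [g, List.foldl_map]

lemma foldl_range_enumerate {α β : Type} (f : β → Int → α → β) (d : α) :
    ∀ (xs : List α) (k : Int) (init : β),
      (List.range xs.length).foldl
        (fun acc (j : Nat) => f acc (k + (j : Int)) (xs.getD j d)) init =
      (PySem.List.enumerate xs k).foldl (fun acc p => f acc p.1 p.2) init := by
  intro xs
  induction xs with
  | nil => intro k init; simp [PySem.List.enumerate]
  | cons x xs ih =>
    intro k init
    rw [show (x :: xs).length = xs.length + 1 from rfl, List.range_succ_eq_map,
      List.foldl_cons, List.foldl_map, PySem.List.enumerate_cons, List.foldl_cons]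
    rw [show f init (k + ((0 : Nat) : Int)) ((x :: xs).getD 0 d) = f init k x by norm_num]
    rw [PySem.List.foldl_congr_mem _ _
      (fun acc (j : Nat) => f acc ((k + 1) + (j : Int)) (xs.getD j d)) _
      (by intro acc j _; show f acc (k + ((j + 1 : Nat) : Int)) _ = _
          rw [show k + ((j + 1 : Nat) : Int) = (k + 1) + (j : Int) by push_cast; ring]
          rfl)]
    exact ih (k + 1) (f init k x)

-- ===== VERDICT (by name: the statement is the Claim_ definition above) =====
theorem biggest_sum_row_spec : Claim_equal_biggest_sum_row := by
  intro mat _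
  unfold Spec_biggest_sum_row
  unfold biggest_sum_row biggest_sum_row_alt
  congr 1
  rw [PySem.List.pyRange_zero_nat, List.foldl_map]
  rw [PySem.List.foldl_congr_mem _ _
    (fun (acc : Int × Int) (j : Nat) =>
      (fun (acc : Int × Int) (i : Int) (row : List Int) =>
        if biggest_sum row > acc.1 then (biggest_sum row, i) else acc)
        acc ((0 : Int) + (j : Int)) (mat.getD j [])) _
    (by intro acc j _
        show (if biggest_sum (PySem.List.pyGetD mat (j : Int) []) > acc.1 then _ else acc) = _
        rw [PySem.List.pyGetD_natCast]
        simp)]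
  rw [foldl_range_enumerate
    (fun (acc : Int × Int) (i : Int) (row : List Int) =>
      if biggest_sum row > acc.1 then (biggest_sum row, i) else acc) [] mat 0 (-1, -1)]
  apply PySem.List.foldl_congr_mem
  intro acc p _
  show (if biggest_sum p.2 > acc.1 then _ else acc) = (if row_best p.2 > acc.1 then _ else acc)
  rw [biggest_sum_eq, ← row_best_eq]
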